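-- pv_equiv track=rewrite | github.com/kodsnack/advent_of_code_2021 | estomagordo-python/3b.py | find_co2
-- ===== SOURCE A (Python) =====
-- def find_co2(lines, n):
--     for x in range(n):
--         if len(lines) == 1:
--             break
--
--         newlines = []
--
--         zeroes = 0
--         ones = 0
--
--         for line in lines:
--             if line[x] == '0':
--                 zeroes += 1
--             else:
--                 ones += 1
--
--         for line in lines:
--             if zeroes > ones:
--                 if line[x] == '1':
--                     newlines.append(line)
--             elif line[x] == '0':
--                 newlines.append(line)
--
--         lines = newlines
--
--     return int(lines[0], 2)
-- ===== SOURCE B (Python) =====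
-- def find_co2(lines, n):
--     # Index phase: count, for every line, each of its prefixes (up to depth n)
--     # in one dictionary built once; the selection phase then walks prefixes
--     # with O(1) lookups instead of re-filtering the list of lines per bit.
--     cnt = {}
--     for line in lines:
--         for x in range(min(len(line), max(n, 0)) + 1):
--             p = line[:x]
--             cnt[p] = cnt.get(p, 0) + 1
--     cur = ''
--     for _ in range(n):
--         if cnt.get(cur, 0) == 1:
--             break
--         zeros = cnt.get(cur + '0', 0)
--         cur += '1' if zeros > cnt.get(cur, 0) - zeros else '0'
--     return int(next(l for l in lines if l.startswith(cur)), 2)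
-- ===== Notes on version B (the rewrite author's own statement) =====
-- stated objective: alternative
-- what changed: Replaces per-round filtering of the surviving line list by a prefix-count dictionary built once in an indexing pass; the rating is then selected by walking prefixes '' -> '0'/'1' -> ... with O(1) dictionary lookups per bit (ties keep '0'), and the final line is recovered by a single startswith scan - no survivor lists are ever rebuilt.
import Mathlib
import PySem

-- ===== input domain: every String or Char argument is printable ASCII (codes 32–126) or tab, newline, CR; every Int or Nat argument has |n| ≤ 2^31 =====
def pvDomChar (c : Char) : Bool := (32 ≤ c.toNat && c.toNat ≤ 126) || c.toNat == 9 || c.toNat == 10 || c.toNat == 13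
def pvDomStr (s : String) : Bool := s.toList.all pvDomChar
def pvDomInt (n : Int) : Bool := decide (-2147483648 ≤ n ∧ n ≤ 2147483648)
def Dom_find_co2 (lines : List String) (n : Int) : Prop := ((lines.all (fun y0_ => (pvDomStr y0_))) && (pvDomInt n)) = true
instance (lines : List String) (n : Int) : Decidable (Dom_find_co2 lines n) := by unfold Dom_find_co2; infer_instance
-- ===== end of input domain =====

-- B replaces A's round-by-round rebuilding of the surviving line list by a prefix-count
-- dictionary built once; the rating is selected by walking prefixes with dictionary lookups
-- and the answer line is recovered by one startswith scan (alternative algorithm, no speed claim).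

-- shared helpers (both Pythons contain the expression `int(…, 2)`; A also indexes `line[x]`)
-- line[x] for 0 ≤ x (the only indices range(n) produces); the default char is never used inside
-- Pre_ (which rules the IndexError out).
def pvCharAt (l : String) (x : Int) : Char := (PySem.Str.pyGet? l x).getD ' '
-- int(s, 2), ported by hand: surrounding whitespace, one optional sign, optional '0b'/'0B'
-- prefix, binary digits with single underscores between digits (one also allowed right after the
-- prefix).  Exact wherever Python's int(s, 2) returns (none = ValueError, excluded by Pre_).
def pvIsWS (c : Char) : Bool :=
  c == ' ' || c == '\t' || c == '\n' || c == '\r' || c == Char.ofNat 11 || c == Char.ofNat 12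
def pvBit (c : Char) : Bool := c == '0' || c == '1'
def pvDigRest : List Char → Bool
  | [] => true
  | ['_'] => false
  | '_' :: c :: t => pvBit c && pvDigRest t
  | c :: t => pvBit c && pvDigRest t
def pvParse2 (s : String) : Option Int :=
  let cs := ((s.toList.dropWhile pvIsWS).reverse.dropWhile pvIsWS).reverse
  let sc : Int × List Char :=
    match cs with
    | '+' :: t => (1, t)
    | '-' :: t => (-1, t)
    | _ => (1, cs)
  let ds : List Char :=
    match sc.2 with
    | '0' :: 'b' :: t => (match t with | '_' :: u => u | _ => t)
    | '0' :: 'B' :: t => (match t with | '_' :: u => u | _ => t)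
    | _ => sc.2
  if (match ds with | [] => false | c :: t => pvBit c && pvDigRest t)
  then some (sc.1 *
    (ds.filter (fun c => c != '_')).foldl (fun a c => 2 * a + (if c = '1' then 1 else 0)) 0)
  else none

-- ===== PORT A =====
def find_co2 (lines : List String) (n : Int) : Int :=
  -- `break` fires iff lines.length = 1, a condition the body preserves, so it is the guard below
  let final := (PySem.List.pyRange 0 n 1).foldl (fun lines x =>
    if lines.length = 1 then lines
    else
      let cnt := lines.foldl
        (fun (p : Int × Int) line =>
          if pvCharAt line x = '0' then (p.1 + 1, p.2) else (p.1, p.2 + 1)) (0, 0)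
      let newlines := lines.foldl
        (fun acc line =>
          if cnt.1 > cnt.2 then
            (if pvCharAt line x = '1' then acc ++ [line] else acc)
          else if pvCharAt line x = '0' then acc ++ [line] else acc) []
      newlines) lines
  (pvParse2 ((PySem.List.pyGet? final 0).getD "")).getD 0

-- ===== PORT B =====
def find_co2_alt (lines : List String) (n : Int) : Int :=
  -- indexing pass: one dictionary counting every prefix (depth ≤ n) of every line
  let cnt := lines.foldl (fun d line =>
      (PySem.List.pyRange 0 (min (PySem.Str.len line) (max n 0) + 1) 1).foldl
        (fun d x =>
          d.insert (PySem.Str.slice line none (some x))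
            (d.getD (PySem.Str.slice line none (some x)) 0 + 1)) d)
    (PySem.Dict.empty)
  -- selection pass: walk prefixes by dictionary lookups (`break` freezes cur, so it is the guard)
  let cur := (PySem.List.pyRange 0 n 1).foldl (fun cur _x =>
      if cnt.getD cur 0 == (1 : Int) then cur
      else
        let zeros := cnt.getD (cur ++ "0") 0
        if zeros > cnt.getD cur 0 - zeros then cur ++ "1" else cur ++ "0") ""
  (pvParse2 ((lines.find? (fun l => PySem.Str.startswith l cur)).getD "")).getD 0

-- ===== PRECONDITION & SPEC =====
-- Pre_-side mirror of one filtering round (independent of the ports).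
def pvStep (lines : List String) (x : Int) : List String :=
  if 2 * lines.countP (fun l => pvCharAt l x = '0') > lines.length
  then lines.filter (fun l => pvCharAt l x = '1')
  else lines.filter (fun l => pvCharAt l x = '0')

-- The surviving lines after the rounds A actually executes; none = A raises an IndexError
-- (a round indexes a line that is too short, or the survivor set has emptied so that the
-- final lines[0] cannot exist).
def pvSurvO (lines : List String) (x : Int) : Nat → Option (List String)
  | 0 => some lines
  | f + 1 =>
    if lines.length = 1 then some lines
    else if lines.isEmpty then none
    else if lines.any (fun l => (l.toList.length : Int) ≤ x) then none
    else pvSurvO (pvStep lines x) (x + 1) f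

-- closed-form 'int(s, 2) accepts s': after optional surrounding whitespace, an optional sign and
-- an optional 0b/0B prefix (with one optional underscore after it), what is left is nonempty,
-- made of '0'/'1'/'_' only, starts and ends with a digit, and has no two adjacent underscores.
def pvBinOK (s : String) : Bool :=
  let cs := ((s.toList.dropWhile pvIsWS).reverse.dropWhile pvIsWS).reverse
  let body : List Char :=
    match cs with
    | '+' :: t => t
    | '-' :: t => t
    | _ => cs
  let ds : List Char :=
    match body with
    | '0' :: 'b' :: t => (match t with | '_' :: u => u | _ => t)
    | '0' :: 'B' :: t => (match t with | '_' :: u => u | _ => t)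
    | _ => body
  !ds.isEmpty && ds.head? != some '_' && ds.getLast? != some '_' &&
    ds.all (fun c => pvBit c || c == '_') &&
    (ds.zip ds.tail).all (fun ab => !(ab.1 == '_' && ab.2 == '_'))

-- Pre_ = exactly the inputs on which Python A returns normally: no round raises an IndexError
-- and int(·, 2) accepts the first surviving line (pvBinOK, a closed-form shape condition).
-- Whether the survivor chain stays nonempty is decided by each round's majority vote, so it is
-- inherently iterative in the input; Pre_ states it with its own recursion pvSurvO (not the ports).
def Pre_find_co2 (lines : List String) (n : Int) : Prop :=
  ((pvSurvO lines 0 n.toNat).elim false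
    (fun fin => pvBinOK (fin.head?.getD ""))) = true
instance (lines : List String) (n : Int) : Decidable (Pre_find_co2 lines n) := by
  unfold Pre_find_co2; infer_instance

def pvWitness_find_co2 : List String × Int := (["01", "10", "11"], 2)

def Spec_find_co2 (lines : List String) (n : Int) (out : Int) : Prop := out = find_co2_alt lines n
instance (lines : List String) (n : Int) (out : Int) : Decidable (Spec_find_co2 lines n out) := by
  unfold Spec_find_co2; infer_instance

-- ===== CLAIM (what is proved, stated in full; the proofs are below) =====
def Claim_equal_find_co2 : Prop := ∀ (lines : List String) (n : Int), Dom_find_co2 lines n → Pre_find_co2 lines n → Spec_find_co2 lines n (find_co2 lines n)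

-- ===== LEMMAS AND PROOFS =====

-- the loop bodies, named for the proofs (definitionally the lambdas inside the two ports)
def pvAstep (x : Int) (lines : List String) : List String :=
  if lines.length = 1 then lines
  else
    let cnt := lines.foldl
      (fun (p : Int × Int) line =>
        if pvCharAt line x = '0' then (p.1 + 1, p.2) else (p.1, p.2 + 1)) (0, 0)
    let newlines := lines.foldl
      (fun acc line =>
        if cnt.1 > cnt.2 then
          (if pvCharAt line x = '1' then acc ++ [line] else acc)
        else if pvCharAt line x = '0' then acc ++ [line] else acc) []
    newlines
def pvBstep (cnt : PySem.Dict String Int) (cur : String) : String :=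
  if cnt.getD cur 0 == (1 : Int) then cur
  else
    let zeros := cnt.getD (cur ++ "0") 0
    if zeros > cnt.getD cur 0 - zeros then cur ++ "1" else cur ++ "0"
def pvBuild (lines : List String) (n : Int) : PySem.Dict String Int :=
  lines.foldl (fun d line =>
    (PySem.List.pyRange 0 (min (PySem.Str.len line) (max n 0) + 1) 1).foldl
      (fun d x =>
        d.insert (PySem.Str.slice line none (some x))
          (d.getD (PySem.Str.slice line none (some x)) 0 + 1)) d)
  (PySem.Dict.empty)

-- survivors of a prefix
def pvHasPfx (p : List Char) (l : String) : Bool := l.toList.take p.length == p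
def pvPF (lines : List String) (p : List Char) : List String := lines.filter (pvHasPfx p)

-- A's counting pass: zeroes = #('0'-lines), ones = rest.
theorem pv_cnt_spec (x : Int) (lines : List String) : ∀ z o : Int,
    lines.foldl
      (fun (p : Int × Int) line =>
        if pvCharAt line x = '0' then (p.1 + 1, p.2) else (p.1, p.2 + 1)) (z, o)
      = (z + (lines.countP (fun l => pvCharAt l x = '0') : Int),
         o + ((lines.length : Int) - (lines.countP (fun l => pvCharAt l x = '0') : Int))) := by
  induction lines with
  | nil => intro z o; simp
  | cons h t ih =>
    intro z o
    by_cases hc : pvCharAt h x = '0' <;>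
      simp [hc, ih] <;> omega

-- A's filtering pass, as a List.filter (Prop-condition shim over PySem.List.foldl_append_if)
theorem pv_foldl_filter (P : String → Prop) [DecidablePred P] (l : List String) :
    l.foldl (fun acc s => if P s then acc ++ [s] else acc) []
      = l.filter (fun s => decide (P s)) := by
  have := PySem.List.foldl_append_if (p := fun s => decide (P s)) (f := id) l []
  simpa using this

-- the number of times line `l` contributes key `p` in B's indexing pass
theorem pv_key_count (l : String) (n : Int) (p : String) :
    ((PySem.List.pyRange 0 (min (PySem.Str.len l) (max n 0) + 1) 1).map
        (fun x => PySem.Str.slice l none (some x))).count p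
      = if p.toList.length ≤ (max n 0).toNat ∧ pvHasPfx p.toList l then 1 else 0 := by
  set M : Nat := (min (PySem.Str.len l) (max n 0)).toNat with hM
  have hlen : PySem.Str.len l = (l.toList.length : Int) := by rw [PySem.Str.len_eq]
  have h0 : (0:Int) ≤ min (PySem.Str.len l) (max n 0) := by
    rw [le_min_iff, hlen]; constructor <;> positivity
  have hMeq : min (PySem.Str.len l) (max n 0) = (M : Int) := by omega
  have hMlen : (M : Int) ≤ (l.toList.length : Int) := by rw [← hlen, ← hMeq]; exact min_le_left _ _
  have hMn : M ≤ (max n 0).toNat := by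
    have : (M : Int) ≤ max n 0 := hMeq ▸ min_le_right _ _
    omega
  rw [hMeq]
  have hrange : PySem.List.pyRange 0 ((M:Int) + 1) 1 = (List.range (M+1)).map (fun j : Nat => (j:Int)) := by
    rw [show ((M:Int)+1) = ((M+1:Nat):Int) by push_cast; ring]
    exact PySem.List.pyRange_zero_natCast (M+1)
  rw [hrange, List.map_map, List.count_eq_countP, List.countP_map]
  have hslice : ∀ j : Nat, (PySem.Str.slice l none (some (j:Int))).toList = l.toList.take j := by
    intro j; simp [PySem.Str.toList_slice, PySem.List.slice_to_natCast]
  have hkey : ∀ j : Nat, j < M + 1 →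
      ((((fun x => PySem.Str.slice l none (some x)) ∘ (fun j : Nat => (j:Int))) j == p)
      = ((j == p.toList.length) && pvHasPfx p.toList l)) := by
    intro j hj
    have hjle : j ≤ l.toList.length := by omega
    simp only [Function.comp]
    rw [Bool.eq_iff_iff, beq_iff_eq, ← String.toList_inj, hslice j, Bool.and_eq_true, beq_iff_eq]
    have hlenj : (l.toList.take j).length = j := by
      rw [List.length_take, min_eq_left hjle]
    constructor
    · intro h
      have hjp : j = p.toList.length := by rw [← hlenj, h]
      exact ⟨hjp, by simp only [pvHasPfx, beq_iff_eq]; rw [← hjp]; exact h⟩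
    · rintro ⟨rfl, h⟩
      simp only [pvHasPfx, beq_iff_eq] at h
      exact h
  rw [List.countP_congr (fun j hj => by
    simp only [Function.comp]
    have := hkey j (List.mem_range.mp hj)
    simp only [Function.comp] at this
    rw [this])]
  by_cases hpfx : pvHasPfx p.toList l
  · simp only [hpfx, Bool.and_true]
    rw [← List.count_eq_countP, List.count_range]
    have hple : p.toList.length ≤ l.toList.length := by
      have h := hpfx
      simp only [pvHasPfx, beq_iff_eq] at h
      have := congrArg List.length h
      rw [List.length_take] at this
      omega
    have hM2 : (M:Int) = min ((l.toList.length : Int)) (max n 0) := by rw [← hlen]; exact hMeq.symm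
    by_cases hle : p.toList.length ≤ (max n 0).toNat
    · rw [if_pos (show p.toList.length < M + 1 by omega), if_pos ⟨hle, trivial⟩]
    · rw [if_neg (show ¬ p.toList.length < M + 1 by omega), if_neg (fun hh => hle hh.1)]
  · have hf : pvHasPfx p.toList l = false := by
      revert hpfx; cases pvHasPfx p.toList l <;> simp
    rw [if_neg (fun hh => hpfx hh.2)]
    simp [hf]

-- the prefix dictionary counts, for each admissible prefix, its survivors
theorem pv_cnt_fold_gen (n : Int) : ∀ (lines : List String) (d : PySem.Dict String Int) (p : String),
    (lines.foldl (fun d line =>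
      (PySem.List.pyRange 0 (min (PySem.Str.len line) (max n 0) + 1) 1).foldl
        (fun d x =>
          d.insert (PySem.Str.slice line none (some x))
            (d.getD (PySem.Str.slice line none (some x)) 0 + 1)) d) d).getD p 0
      = d.getD p 0 + (if p.toList.length ≤ (max n 0).toNat
          then ((lines.countP (pvHasPfx p.toList) : Int)) else 0) := by
  intro lines
  induction lines with
  | nil => intro d p; simp
  | cons h t ih =>
    intro d p
    rw [List.foldl_cons, ih]
    have hbody : ((PySem.List.pyRange 0 (min (PySem.Str.len h) (max n 0) + 1) 1).foldl
        (fun d x =>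
          d.insert (PySem.Str.slice h none (some x))
            (d.getD (PySem.Str.slice h none (some x)) 0 + 1)) d).getD p 0
        = d.getD p 0 + (if p.toList.length ≤ (max n 0).toNat ∧ pvHasPfx p.toList h then 1 else 0) := by
      rw [show ((PySem.List.pyRange 0 (min (PySem.Str.len h) (max n 0) + 1) 1).foldl
          (fun d x =>
            d.insert (PySem.Str.slice h none (some x))
              (d.getD (PySem.Str.slice h none (some x)) 0 + 1)) d)
          = (((PySem.List.pyRange 0 (min (PySem.Str.len h) (max n 0) + 1) 1).map
              (fun x => PySem.Str.slice h none (some x))).foldl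
            (fun d k => d.insert k (d.getD k 0 + 1)) d) from (List.foldl_map (f := fun x => PySem.Str.slice h none (some x)) (g := fun (d : PySem.Dict String Int) (k : String) => d.insert k (d.getD k 0 + 1))).symm]
      rw [PySem.Dict.getD_foldl_insert_add_one, pv_key_count h n p]
      split_ifs <;> simp
    rw [hbody, List.countP_cons]
    by_cases hle : p.toList.length ≤ (max n 0).toNat
    · by_cases hp : pvHasPfx p.toList h
      · rw [if_pos ⟨hle, hp⟩, if_pos hle, if_pos hle]
        simp [hp]
        ring
      · rw [if_neg (fun hh => hp hh.2), if_pos hle, if_pos hle]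
        simp [hp]
    · rw [if_neg (fun hh => hle hh.1), if_neg hle, if_neg hle]
      ring
theorem pv_cnt_fold (lines : List String) (n : Int) (p : String) :
    (pvBuild lines n).getD p 0
      = if p.toList.length ≤ (max n 0).toNat then ((pvPF lines p.toList).length : Int) else 0 := by
  rw [pvBuild, pv_cnt_fold_gen n lines PySem.Dict.empty p]
  rw [PySem.Dict.getD_empty]
  rw [pvPF, ← List.countP_eq_length_filter]
  ring

-- extending the prefix by one chosen bit = filtering its survivors at that position
theorem pv_pfx_snoc (l : String) (p : List Char) (c : Char) (hc : c ≠ ' ') :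
    pvHasPfx (p ++ [c]) l = (pvHasPfx p l && decide (pvCharAt l (p.length : Int) = c)) := by
  have hget : pvCharAt l (p.length : Int) = (l.toList[p.length]?).getD ' ' := by
    simp [pvCharAt]
  simp only [pvHasPfx, List.length_append, List.length_singleton]
  rw [List.take_add_one]
  rw [Bool.eq_iff_iff, beq_iff_eq, Bool.and_eq_true, beq_iff_eq, decide_eq_true_eq]
  by_cases hl : p.length < l.toList.length
  · rw [List.getElem?_eq_getElem hl]
    simp only [Option.toList_some]
    constructor
    · intro h
      have hlen : (l.toList.take p.length).length = p.length := by
        rw [List.length_take]; omega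
      obtain ⟨h1, h2⟩ := List.append_inj h (by omega)
      refine ⟨h1, by simpa [hget, List.getElem?_eq_getElem hl] using List.head_eq_of_cons_eq h2⟩
    · rintro ⟨h1, h2⟩
      rw [h1, hget, List.getElem?_eq_getElem hl] at *
      simp at h2
      rw [h2]
  · rw [List.getElem?_eq_none (by omega)]
    simp only [Option.toList_none, List.append_nil]
    constructor
    · intro h
      have := congrArg List.length h
      simp [List.length_take] at this
      omega
    · rintro ⟨h1, h2⟩
      rw [hget, List.getElem?_eq_none (by omega)] at h2
      simp at h2
      exact absurd h2.symm hc
theorem pv_pf_snoc (lines : List String) (p : List Char) (c : Char) (hc : c ≠ ' ') :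
    pvPF lines (p ++ [c])
      = (pvPF lines p).filter (fun l => pvCharAt l (p.length : Int) = c) := by
  simp only [pvPF, List.filter_filter]
  apply List.filter_congr
  intro l _
  rw [pv_pfx_snoc l p c hc]
  ac_rfl

-- the two loops stay in lockstep: A's survivor list is always B's prefix's survivor set
theorem pv_loop_rel (lines : List String) (n : Int)
    (cnt : PySem.Dict String Int)
    (hcnt : ∀ p : String, cnt.getD p 0
      = if p.toList.length ≤ (max n 0).toNat then ((pvPF lines p.toList).length : Int) else 0) :
    ∀ (f : Nat) (x : Int) (S : List String) (cur : String), 0 ≤ x → (n - x).toNat = f →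
    S = pvPF lines cur.toList →
    (cur.toList.length = x.toNat ∨ S.length = 1) →
    cur.toList.length ≤ (max n 0).toNat →
    (PySem.List.pyRange x n 1).foldl (fun S x => pvAstep x S) S
      = pvPF lines (((PySem.List.pyRange x n 1).foldl (fun cur _x => pvBstep cnt cur) cur).toList) := by
  intro f
  induction f with
  | zero =>
    intro x S cur hx0 hf hS _ _
    rw [PySem.List.pyRange_one_eq_nil (by omega)]
    simpa using hS
  | succ f ih =>
    intro x S cur hx0 hf hS hdisj hle
    have hxn : x < n := by omega
    rw [PySem.List.pyRange_one_cons hxn, List.foldl_cons, List.foldl_cons]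
    have hguard : cnt.getD cur 0 = (S.length : Int) := by
      rw [hcnt cur, if_pos hle, hS]
    by_cases hS1 : S.length = 1
    · have hA : pvAstep x S = S := by simp [pvAstep, hS1]
      have hB : pvBstep cnt cur = cur := by
        simp [pvBstep, hguard, hS1]
      rw [hA, hB]
      exact ih (x+1) S cur (by omega) (by omega) hS (Or.inr hS1) hle
    · have hk : cur.toList.length = x.toNat := hdisj.resolve_right hS1
      have hkx : (cur.toList.length : Int) = x := by omega
      have hle1 : cur.toList.length + 1 ≤ (max n 0).toNat := by omega
      have hgf : (cnt.getD cur 0 == (1 : Int)) = false := by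
        rw [hguard]
        simp only [beq_eq_false_iff_ne, ne_eq]
        intro hh
        exact hS1 (by exact_mod_cast hh)
      -- A's round, reduced to a majority test and a filter
      set zc : Nat := S.countP (fun l => pvCharAt l x = '0') with hzc
      have hA : pvAstep x S
          = if (0 + (zc : Int) > 0 + ((S.length : Int) - (zc : Int)))
            then S.filter (fun l => decide (pvCharAt l x = '1'))
            else S.filter (fun l => decide (pvCharAt l x = '0')) := by
        rw [pvAstep, if_neg hS1]
        simp only [pv_cnt_spec x S 0 0, ← hzc]
        by_cases hmaj : (0 + (zc : Int) > 0 + ((S.length : Int) - (zc : Int)))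
        · rw [if_pos hmaj]
          simp only [hmaj, if_true]
          exact pv_foldl_filter _ S
        · rw [if_neg hmaj]
          simp only [hmaj, if_false]
          exact pv_foldl_filter _ S
      -- B's lookups
      have htl0 : (cur ++ "0").toList = cur.toList ++ ['0'] := by
        rw [String.toList_append]; rfl
      have htl1 : (cur ++ "1").toList = cur.toList ++ ['1'] := by
        rw [String.toList_append]; rfl
      have hz0 : cnt.getD (cur ++ "0") 0 = (zc : Int) := by
        rw [hcnt (cur ++ "0"), htl0, if_pos (by simpa using hle1)]
        rw [pv_pf_snoc lines cur.toList '0' (by decide), hkx, ← hS]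
        rw [hzc, List.countP_eq_length_filter]
      have hfilters : ∀ c : Char, c ≠ ' ' →
          S.filter (fun l => decide (pvCharAt l x = c)) = pvPF lines (cur.toList ++ [c]) := by
        intro c hc
        rw [pv_pf_snoc lines cur.toList c hc, hkx, ← hS]
      by_cases hmaj : (0 + (zc : Int) > 0 + ((S.length : Int) - (zc : Int)))
      · have hB : pvBstep cnt cur = cur ++ "1" := by
          rw [pvBstep, if_neg (by simp [hgf]), hz0]
          rw [if_pos (by rw [hguard]; omega)]
        rw [hA, if_pos hmaj, hB]
        refine ih (x+1) _ _ (by omega) (by omega) ?_ (Or.inl ?_) ?_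
        · rw [hfilters '1' (by decide), htl1]
        · rw [htl1]
          simp only [List.length_append, List.length_singleton]
          omega
        · rw [htl1]
          simpa using hle1
      · have hB : pvBstep cnt cur = cur ++ "0" := by
          rw [pvBstep, if_neg (by simp [hgf]), hz0]
          rw [if_neg (by rw [hguard]; omega)]
        rw [hA, if_neg hmaj, hB]
        refine ih (x+1) _ _ (by omega) (by omega) ?_ (Or.inl ?_) ?_
        · rw [hfilters '0' (by decide), htl0]
        · rw [htl0]
          simp only [List.length_append, List.length_singleton]
          omega
        · rw [htl0]
          simpa using hle1

-- the whole-program assembly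
theorem pv_pf_nil (lines : List String) : pvPF lines [] = lines := by
  simp [pvPF, pvHasPfx]

theorem pv_head_eq (lines : List String) (p : List Char) (cur : String) (hcur : cur.toList = p) :
    lines.find? (fun l => PySem.Str.startswith l cur) = (pvPF lines p).head? := by
  have hpred : (fun l => PySem.Str.startswith l cur) = pvHasPfx p := by
    funext l
    rw [Bool.eq_iff_iff, PySem.Str.startswith_eq]
    rw [PySem.Chars.startswith_iff, hcur]
    simp only [pvHasPfx, beq_iff_eq]
    rw [List.prefix_iff_eq_take]
    exact comm
  rw [hpred, pvPF]
  exact (List.head?_filter).symm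

-- ===== VERDICT (by name: the statement is the Claim_ definition above) =====
theorem find_co2_spec : Claim_equal_find_co2 := by
  intro lines n _ _
  unfold Spec_find_co2
  have hA : find_co2 lines n
      = (pvParse2 ((PySem.List.pyGet? ((PySem.List.pyRange 0 n 1).foldl
          (fun S x => pvAstep x S) lines) 0).getD "")).getD 0 := rfl
  have hB : find_co2_alt lines n
      = (pvParse2 ((lines.find? (fun l => PySem.Str.startswith l
          ((PySem.List.pyRange 0 n 1).foldl (fun cur _x => pvBstep (pvBuild lines n) cur) ""))).getD "")).getD 0 := rfl
  rw [hA, hB]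
  set curf := (PySem.List.pyRange 0 n 1).foldl (fun cur _x => pvBstep (pvBuild lines n) cur) "" with hcurf
  have hrel := pv_loop_rel lines n (pvBuild lines n) (fun p => pv_cnt_fold lines n p)
    (n - 0).toNat 0 lines "" (by omega) rfl
    (by rw [show (String.toList "") = ([] : List Char) from rfl, pv_pf_nil])
    (Or.inl (by simp))
    (by simp)
  rw [← hcurf] at hrel
  rw [hrel]
  rw [pv_head_eq lines curf.toList curf rfl]
  congr 1
  cases (pvPF lines curf.toList) <;> simp [PySem.List.pyGet?, PySem.List.pyIdx?]
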